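-- pv_equiv track=rewrite | github.com/mattjhussey/pemjh | src/pemjh/challenge174/main.py | getNumEvenDivisors
-- ===== SOURCE A (Python) =====
-- def getNumEvenDivisors(n):
--     nDiv = 0
--
--     two = 2
--     while two**2 < n:
--         if n % (two * 2) == 0:
--             nDiv += 1
--
--         two += 2
--
--     return nDiv
-- ===== SOURCE B (Python) =====
-- def getNumEvenDivisors(n):
--     # Number of factorizations n = 4*k*m with 0 < k < m: reduce to q = n // 4
--     # and halve the divisor count of q (a perfect-square root pairs with itself).
--     if n % 4 != 0:
--         return 0
--     q = n // 4
--     t = 0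
--     i = 1
--     while i * i <= q:
--         if q % i == 0:
--             t += 1 if i * i == q else 2
--         i += 1
--     return t // 2
-- ===== Notes on version B (the rewrite author's own statement) =====
-- stated objective: alternative
-- what changed: B returns zero unless n is a multiple of four, otherwise reduces to the quotient q of n by four, counts all divisors of q by paired trial division (an exact square root weighted once) and halves that count, where A instead scans the even candidates below the square root of n testing divisibility of n directly.
import Mathlib
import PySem

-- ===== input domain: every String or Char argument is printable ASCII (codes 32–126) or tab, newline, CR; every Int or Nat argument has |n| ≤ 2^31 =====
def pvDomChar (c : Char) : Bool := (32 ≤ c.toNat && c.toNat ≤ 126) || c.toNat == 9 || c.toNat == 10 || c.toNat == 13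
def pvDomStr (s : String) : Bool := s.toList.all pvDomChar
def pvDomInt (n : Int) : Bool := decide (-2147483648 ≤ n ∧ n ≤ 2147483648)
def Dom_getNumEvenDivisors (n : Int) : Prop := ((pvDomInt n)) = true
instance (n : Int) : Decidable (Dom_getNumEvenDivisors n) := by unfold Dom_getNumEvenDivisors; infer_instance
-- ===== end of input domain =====

-- B reduces to q = n // 4 and halves the full divisor count of q (square root weighted once),
-- instead of A's direct scan of even candidates below sqrt(n); alternative algorithm, similar cost.

-- ===== PORT A =====
-- A's `two` is always a nonnegative even int (2, 4, 6, …), carried here as a Nat.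
-- fuel = remaining iterations, a totality guard only: n.toNat steps always suffice from two = 2
def pyLoopA (n : Int) : Nat → Nat → Int → Int
  | 0, _, nDiv => nDiv
  | d + 1, two, nDiv =>
    if (two : Int) * two < n then
      pyLoopA n d (two + 2) (if PySem.Int.mod n ((two : Int) * 2) = 0 then nDiv + 1 else nDiv)
    else nDiv

def getNumEvenDivisors (n : Int) : Int := pyLoopA n n.toNat 2 0

-- ===== PORT B =====
-- Source B's divisor-counting while loop: i = 1; while i*i <= q: if q % i == 0: t += 1 if i*i == q else 2
-- fuel = remaining iterations, a totality guard only: q.toNat + 1 steps always suffice from i = 1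
def bLoop (q : Int) : Nat → Nat → Int → Int
  | 0, _, t => t
  | d + 1, i, t =>
    if (i : Int) * i ≤ q then
      bLoop q d (i + 1)
        (if PySem.Int.mod q (i : Int) = 0 then
          t + (if (i : Int) * i = q then 1 else 2)
        else t)
    else t

def getNumEvenDivisors_alt (n : Int) : Int :=
  if PySem.Int.mod n 4 ≠ 0 then 0
  else PySem.Int.floordiv
    (bLoop (PySem.Int.floordiv n 4) ((PySem.Int.floordiv n 4).toNat + 1) 1 0) 2

-- ===== PRECONDITION & SPEC =====
def Spec_getNumEvenDivisors (n : Int) (out : Int) : Prop := out = getNumEvenDivisors_alt n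
instance (n : Int) (out : Int) : Decidable (Spec_getNumEvenDivisors n out) := by unfold Spec_getNumEvenDivisors; infer_instance

-- ===== CLAIM (what is proved, stated in full; the proofs are below) =====
def Claim_equal_getNumEvenDivisors : Prop := ∀ (n : Int), Dom_getNumEvenDivisors n → Spec_getNumEvenDivisors n (getNumEvenDivisors n)

-- ===== LEMMAS AND PROOFS =====

-- the set of loop indices k (two = 2*k) that A's loop from two = 2*m onwards counts
def Sge (n : Int) (m : Nat) : Finset ℕ :=
  (Finset.range n.toNat).filter
    (fun k => m ≤ k ∧ 4 * (k : Int) * k < n ∧ PySem.Int.mod n (4 * (k : Int)) = 0)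

lemma Sge_empty_of_le (n : Int) (m : Nat) (h : ∀ k : ℕ, m ≤ k → ¬ (4 * (k : Int) * k < n)) :
    Sge n m = ∅ := by
  apply Finset.filter_false_of_mem
  intro k _
  intro hk
  exact h k hk.1 hk.2.1

lemma Sge_step (n : Int) (m : Nat) (hm : 1 ≤ m) (h : 4 * (m : Int) * m < n) :
    (Sge n m).card =
      (if PySem.Int.mod n (4 * (m : Int)) = 0 then 1 else 0) + (Sge n (m + 1)).card := by
  have hm' : (1 : Int) ≤ (m : Int) := by exact_mod_cast hm
  have hmlt : m < n.toNat := by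
    have h1 : (m : Int) ≤ 4 * (m : Int) * m := by nlinarith
    have h2 : (m : Int) < n := by omega
    omega
  by_cases hd : PySem.Int.mod n (4 * (m : Int)) = 0
  · have hins : Sge n m = insert m (Sge n (m + 1)) := by
      ext k
      simp only [Sge, Finset.mem_filter, Finset.mem_range, Finset.mem_insert]
      constructor
      · rintro ⟨hk1, hk2, hk3, hk4⟩
        rcases Nat.eq_or_lt_of_le hk2 with rfl | hlt
        · exact Or.inl rfl
        · exact Or.inr ⟨hk1, by omega, hk3, hk4⟩
      · rintro (rfl | ⟨hk1, hk2, hk3, hk4⟩)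
        · exact ⟨hmlt, le_refl k, h, hd⟩
        · exact ⟨hk1, by omega, hk3, hk4⟩
    have hnotmem : m ∉ Sge n (m + 1) := by
      simp only [Sge, Finset.mem_filter, Finset.mem_range]
      rintro ⟨-, hge, -, -⟩
      omega
    rw [hins, Finset.card_insert_of_notMem hnotmem, if_pos hd]
    omega
  · have heq : Sge n m = Sge n (m + 1) := by
      ext k
      simp only [Sge, Finset.mem_filter, Finset.mem_range]
      constructor
      · rintro ⟨hk1, hk2, hk3, hk4⟩
        rcases Nat.eq_or_lt_of_le hk2 with rfl | hlt
        · exact absurd hk4 hd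
        · exact ⟨hk1, by omega, hk3, hk4⟩
      · rintro ⟨hk1, hk2, hk3, hk4⟩
        exact ⟨hk1, by omega, hk3, hk4⟩
    rw [heq, if_neg hd]
    omega

lemma loopA_eq (n : Int) :
    ∀ d m nDiv, 1 ≤ m → n.toNat ≤ m + d →
      pyLoopA n d (2 * m) nDiv = nDiv + ((Sge n m).card : Int) := by
  intro d
  induction d with
  | zero =>
    intro m nDiv hm hb
    have hm' : (1 : Int) ≤ (m : Int) := by exact_mod_cast hm
    have hn : (n : Int) ≤ (n.toNat : Int) := Int.self_le_toNat n
    have hnm : (n : Int) ≤ (m : Int) := by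
      have : ((n.toNat : Nat) : Int) ≤ (m : Int) := by exact_mod_cast (by omega : n.toNat ≤ m)
      omega
    rw [pyLoopA]
    have : Sge n m = ∅ := by
      apply Sge_empty_of_le
      intro k hk hlt
      have hk' : (m : Int) ≤ (k : Int) := by exact_mod_cast hk
      nlinarith
    rw [this]
    simp
  | succ d ih =>
    intro m nDiv hm hb
    have hm' : (1 : Int) ≤ (m : Int) := by exact_mod_cast hm
    by_cases hc : ((2 * m : Nat) : Int) * ((2 * m : Nat) : Int) < n
    · rw [pyLoopA, if_pos hc]
      have h2 : 2 * m + 2 = 2 * (m + 1) := by omega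
      rw [h2, ih (m + 1) _ (by omega) (by omega)]
      have harg : ((2 * m : Nat) : Int) * 2 = 4 * (m : Int) := by push_cast; ring
      have hsq : 4 * (m : Int) * m < n := by
        have := hc
        push_cast at this
        nlinarith
      rw [harg, Sge_step n m hm hsq]
      split_ifs <;> push_cast <;> omega
    · rw [pyLoopA, if_neg hc]
      have hsq : ¬ (4 * (m : Int) * m < n) := by
        intro hlt
        apply hc
        push_cast
        nlinarith
      have : Sge n m = ∅ := by
        apply Sge_empty_of_le
        intro k hk hlt
        have hk' : (m : Int) ≤ (k : Int) := by exact_mod_cast hk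
        nlinarith
      rw [this]
      simp

lemma A_eq_card (n : Int) : getNumEvenDivisors n = ((Sge n 1).card : Int) := by
  have := loopA_eq n n.toNat 1 0 (le_refl 1) (by omega)
  simpa [getNumEvenDivisors] using this

-- the indices k ≥ m that B's loop over q still visits and counts, with their weights
def Wge (q : Int) (m : Nat) : Finset ℕ :=
  (Finset.range (q.toNat + 1)).filter
    (fun k => m ≤ k ∧ (k : Int) * k ≤ q ∧ PySem.Int.mod q (k : Int) = 0)

def wt (q : Int) (k : ℕ) : Int := if (k : Int) * k = q then 1 else 2

lemma Wge_empty_of_le (q : Int) (m : Nat) (h : ∀ k : ℕ, m ≤ k → ¬ ((k : Int) * k ≤ q)) :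
    Wge q m = ∅ := by
  apply Finset.filter_false_of_mem
  intro k _
  intro hk
  exact h k hk.1 hk.2.1

lemma Wge_sum_step (q : Int) (m : Nat) (hm : 1 ≤ m) (h : (m : Int) * m ≤ q) :
    ((Wge q m).sum (wt q)) =
      (if PySem.Int.mod q (m : Int) = 0 then wt q m else 0) + (Wge q (m + 1)).sum (wt q) := by
  have hm' : (1 : Int) ≤ (m : Int) := by exact_mod_cast hm
  have hmlt : m < q.toNat + 1 := by
    have h1 : (m : Int) ≤ (m : Int) * m := by nlinarith
    have h2 : (m : Int) ≤ q := by omega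
    omega
  by_cases hd : PySem.Int.mod q (m : Int) = 0
  · have hins : Wge q m = insert m (Wge q (m + 1)) := by
      ext k
      simp only [Wge, Finset.mem_filter, Finset.mem_range, Finset.mem_insert]
      constructor
      · rintro ⟨hk1, hk2, hk3, hk4⟩
        rcases Nat.eq_or_lt_of_le hk2 with rfl | hlt
        · exact Or.inl rfl
        · exact Or.inr ⟨hk1, by omega, hk3, hk4⟩
      · rintro (rfl | ⟨hk1, hk2, hk3, hk4⟩)
        · exact ⟨hmlt, le_refl k, h, hd⟩
        · exact ⟨hk1, by omega, hk3, hk4⟩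
    have hnotmem : m ∉ Wge q (m + 1) := by
      simp only [Wge, Finset.mem_filter, Finset.mem_range]
      rintro ⟨-, hge, -, -⟩
      omega
    rw [hins, Finset.sum_insert hnotmem, if_pos hd]
  · have heq : Wge q m = Wge q (m + 1) := by
      ext k
      simp only [Wge, Finset.mem_filter, Finset.mem_range]
      constructor
      · rintro ⟨hk1, hk2, hk3, hk4⟩
        rcases Nat.eq_or_lt_of_le hk2 with rfl | hlt
        · exact absurd hk4 hd
        · exact ⟨hk1, by omega, hk3, hk4⟩
      · rintro ⟨hk1, hk2, hk3, hk4⟩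
        exact ⟨hk1, by omega, hk3, hk4⟩
    rw [heq, if_neg hd]
    omega

lemma loopB_eq (q : Int) :
    ∀ d m t, 1 ≤ m → q.toNat + 1 ≤ m + d →
      bLoop q d m t = t + (Wge q m).sum (wt q) := by
  intro d
  induction d with
  | zero =>
    intro m t hm hb
    have hm' : (1 : Int) ≤ (m : Int) := by exact_mod_cast hm
    have hq : (q : Int) ≤ (q.toNat : Int) := Int.self_le_toNat q
    have hqm : (q : Int) < (m : Int) := by
      have : ((q.toNat + 1 : Nat) : Int) ≤ (m : Int) := by
        exact_mod_cast (by omega : q.toNat + 1 ≤ m)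
      push_cast at this
      omega
    rw [bLoop]
    have : Wge q m = ∅ := by
      apply Wge_empty_of_le
      intro k hk hle
      have hk' : (m : Int) ≤ (k : Int) := by exact_mod_cast hk
      nlinarith
    rw [this]
    simp
  | succ d ih =>
    intro m t hm hb
    have hm' : (1 : Int) ≤ (m : Int) := by exact_mod_cast hm
    by_cases hc : (m : Int) * m ≤ q
    · rw [bLoop, if_pos hc]
      rw [ih (m + 1) _ (by omega) (by omega)]
      rw [Wge_sum_step q m hm hc]
      unfold wt
      split_ifs <;> omega
    · rw [bLoop, if_neg hc]
      have : Wge q m = ∅ := by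
        apply Wge_empty_of_le
        intro k hk hle
        have hk' : (m : Int) ≤ (k : Int) := by exact_mod_cast hk
        nlinarith
      rw [this]
      simp

-- the small-divisor set counted by A, re-expressed over q = n / 4
def Dlt (q : Int) : Finset ℕ := (Wge q 1).filter (fun k => (k : Int) * k < q)
def Deq (q : Int) : Finset ℕ := (Wge q 1).filter (fun k => (k : Int) * k = q)

lemma Wge_sum_split (q : Int) :
    (Wge q 1).sum (wt q) = 2 * ((Dlt q).card : Int) + ((Deq q).card : Int) := by
  rw [← Finset.sum_filter_add_sum_filter_not (Wge q 1) (fun k : ℕ => (k : Int) * k < q) (wt q)]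
  have h1 : (Dlt q).sum (wt q) = (Dlt q).sum (fun _ => (2 : Int)) := by
    refine Finset.sum_congr rfl (fun k hk => ?_)
    simp only [Dlt, Finset.mem_filter] at hk
    unfold wt
    rw [if_neg (by omega)]
  have hset : (Wge q 1).filter (fun k : ℕ => ¬ (k : Int) * k < q) = Deq q := by
    ext k
    simp only [Deq, Wge, Finset.mem_filter, Finset.mem_range]
    constructor
    · rintro ⟨⟨h1, h2, h3, h4⟩, h5⟩
      exact ⟨⟨h1, h2, h3, h4⟩, by omega⟩
    · rintro ⟨⟨h1, h2, h3, h4⟩, h5⟩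
      exact ⟨⟨h1, h2, h3, h4⟩, by omega⟩
  have h2 : (Deq q).sum (wt q) = (Deq q).sum (fun _ => (1 : Int)) := by
    refine Finset.sum_congr rfl (fun k hk => ?_)
    simp only [Deq, Finset.mem_filter] at hk
    unfold wt
    rw [if_pos hk.2]
  rw [show (Dlt q) = (Wge q 1).filter (fun k : ℕ => (k : Int) * k < q) from rfl] at h1
  rw [h1, hset, h2, Finset.sum_const, Finset.sum_const, nsmul_eq_mul, nsmul_eq_mul]
  show ((Dlt q).card : Int) * 2 + _ = _
  ring

lemma Deq_card_le_one (q : Int) : (Deq q).card ≤ 1 := by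
  rw [Finset.card_le_one]
  intro a ha b hb
  simp only [Deq, Finset.mem_filter] at ha hb
  have : (a : Int) * a = (b : Int) * b := by omega
  have : a * a = b * b := by exact_mod_cast this
  exact Nat.mul_self_inj.mp this

lemma Sge_eq_Dlt (q : Int) : Sge (4 * q) 1 = Dlt q := by
  ext k
  simp only [Sge, Dlt, Wge, Finset.mem_filter, Finset.mem_range]
  constructor
  · rintro ⟨hk1, hk2, hk3, hk4⟩
    have hk2' : (1 : Int) ≤ (k : Int) := by exact_mod_cast hk2
    have hsq : (k : Int) * k < q := by nlinarith
    have hdvd : (k : Int) ∣ q := by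
      have h4k : 4 * (k : Int) ∣ 4 * q := (PySem.Int.mod_eq_zero_iff_dvd _ _).mp hk4
      obtain ⟨c, hc⟩ := h4k
      have hc2 : 4 * q = 4 * ((k : Int) * c) := by rw [← mul_assoc]; exact hc
      exact ⟨c, by linarith⟩
    have hkq : (k : Int) < q := by nlinarith
    refine ⟨⟨?_, hk2, by omega, (PySem.Int.mod_eq_zero_iff_dvd q (k : Int)).mpr hdvd⟩, hsq⟩
    omega
  · rintro ⟨⟨hk1, hk2, hk3, hk4⟩, hk5⟩
    have hk2' : (1 : Int) ≤ (k : Int) := by exact_mod_cast hk2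
    have hdvd : (k : Int) ∣ q := (PySem.Int.mod_eq_zero_iff_dvd q (k : Int)).mp hk4
    obtain ⟨c, hc⟩ := hdvd
    have hkq : (k : Int) < q := by nlinarith
    refine ⟨?_, hk2, by nlinarith, (PySem.Int.mod_eq_zero_iff_dvd _ _).mpr ⟨c, by rw [hc]; ring⟩⟩
    have hq4 : q < 4 * q := by nlinarith
    omega

lemma main_eq (n : Int) : getNumEvenDivisors n = getNumEvenDivisors_alt n := by
  by_cases h4 : PySem.Int.mod n 4 = 0
  · have hdvd : (4 : Int) ∣ n := (PySem.Int.mod_eq_zero_iff_dvd n 4).mp h4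
    obtain ⟨q, hq⟩ := hdvd
    have hfd : PySem.Int.floordiv n 4 = q := by
      rw [PySem.Int.floordiv_eq_ediv_of_pos (by omega : (0 : Int) < 4), hq]
      exact Int.mul_ediv_cancel_left q (by omega)
    rw [getNumEvenDivisors_alt, if_neg (by simpa using h4), hfd]
    rw [loopB_eq q (q.toNat + 1) 1 0 (le_refl 1) (by omega)]
    rw [Wge_sum_split q]
    have hs := Deq_card_le_one q
    rw [PySem.Int.floordiv_eq_ediv_of_pos (by omega : (0 : Int) < 2)]
    rw [A_eq_card, hq, Sge_eq_Dlt]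
    omega
  · have hA : Sge n 1 = ∅ := by
      apply Finset.filter_false_of_mem
      intro k hk
      rintro ⟨hk1, hk2, hk3⟩
      apply h4
      have h4k : 4 * (k : Int) ∣ n := (PySem.Int.mod_eq_zero_iff_dvd _ _).mp hk3
      obtain ⟨c, hc⟩ := h4k
      exact (PySem.Int.mod_eq_zero_iff_dvd n 4).mpr ⟨(k : Int) * c, by rw [hc]; ring⟩
    rw [getNumEvenDivisors_alt, if_pos (by simpa using h4), A_eq_card, hA]
    simp

-- ===== VERDICT (by name: the statement is the Claim_ definition above) =====
theorem getNumEvenDivisors_spec : Claim_equal_getNumEvenDivisors := by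
  intro n _
  exact main_eq n
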